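-- pv_equiv track=rewrite | github.com/wadengroff/vga_graphics | python/bit_conversions.py | neg_int_to_bitstring
-- ===== SOURCE A (Python) =====
-- def pos_int_to_bitstring(value, length):
--     bitstring = ""
--     while (value != 0):
--         bitstring =  str(value % 2) + bitstring
--         value = value // 2
--
--     while len(bitstring) < length:
--         bitstring = "0" + bitstring
--     return bitstring
--
-- def invert_bitstring(bitstring):
--     for ind in range(len(bitstring)):
--         if bitstring[ind] == "0":
--             bitstring = bitstring[:ind] + "1" + bitstring[ind+1:]
--         else:
--             bitstring = bitstring[:ind] + "0" + bitstring[ind+1:]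
--     return bitstring
--
-- def add_one(bitstring):
--     carry = 1
--     for ind in range(len(bitstring)-1, -1, -1):
--         if carry == 1 and bitstring[ind] == "1":
--             bitstring = bitstring[:ind] + "0" + bitstring[ind+1:]
--             carry = 1
--         elif carry == 1:
--             bitstring = bitstring[:ind] + "1" + bitstring[ind+1:]
--             carry = 0
--     return bitstring
--
-- def neg_int_to_bitstring(value, length):
--
--     if value == -(2**(length-1)):
--         bitstring = ""
--         for i in range(length - 1):
--             bitstring = bitstring + "0"
--         return "1" + bitstring
--     bitstring = pos_int_to_bitstring(abs(value), length)
--     bitstring = invert_bitstring(bitstring)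
--     return add_one(bitstring)
-- ===== SOURCE B (Python) =====
-- def neg_int_to_bitstring(value, length):
--     if value == 0:
--         return "0" * max(length, 0)
--     a = abs(value)
--     w = max(length, a.bit_length())
--     return format((1 << w) - a, "0{}b".format(w))
-- ===== Notes on version B (the rewrite author's own statement) =====
-- stated objective: faster
-- what changed: A builds the bitstring bit by bit (divmod loop, per-index invert with slicing, ripple-carry add-one), rebuilding the whole string at every index; B computes the same two's-complement representation in closed form as (1 << width) - abs(value) rendered by format() with zero padding, where width = max(length, abs(value).bit_length()).
-- intended difference: On value == 0 with length <= -1074, CPython's 2**(length-1) underflows to the float 0.0 so A's guard '0 == -(0.0)' fires and A returns '1'; B returns '' (0 padded to a non-positive width), the intended value and the one A itself returns for every other non-positive length. — e.g. on neg_int_to_bitstring(0, -1074): A returns "1", B returns ""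
import Mathlib
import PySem

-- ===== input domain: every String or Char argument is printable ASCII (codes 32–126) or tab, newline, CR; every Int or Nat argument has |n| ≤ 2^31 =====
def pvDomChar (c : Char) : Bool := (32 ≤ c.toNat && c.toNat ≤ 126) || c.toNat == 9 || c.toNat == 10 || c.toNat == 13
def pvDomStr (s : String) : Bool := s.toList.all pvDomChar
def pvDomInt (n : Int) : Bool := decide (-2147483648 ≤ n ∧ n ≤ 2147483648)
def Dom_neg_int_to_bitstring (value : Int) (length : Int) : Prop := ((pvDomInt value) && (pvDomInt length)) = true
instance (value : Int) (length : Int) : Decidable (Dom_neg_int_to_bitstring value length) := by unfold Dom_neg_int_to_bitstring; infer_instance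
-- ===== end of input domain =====

-- B replaces A's bit-by-bit string surgery (divmod loop, per-index invert, ripple-carry add) by the
-- closed form (1 << width) - |value| rendered in binary and zero-padded; objective: faster (constant/asymptotic mechanism: no quadratic string rebuilding).


-- ===== PORT A =====
-- pos_int_to_bitstring, first while loop ('while value != 0').  The 'value < 0' test only makes the
-- recursion total: Python's loop never terminates for negative value, and A only calls this on abs(value) ≥ 0.
def pvPosLoop (value : Int) (bitstring : List Char) : List Char :=
  if value = 0 then bitstring
  else if value < 0 then bitstring
  else pvPosLoop (PySem.Int.floordiv value 2) ((PySem.Int.toStr (PySem.Int.mod value 2)).toList ++ bitstring)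
termination_by value.toNat
decreasing_by
  rename_i h0 hneg
  rw [PySem.Int.floordiv_eq_ediv_of_pos (by omega)]
  omega

-- pos_int_to_bitstring, second while loop ('while len(bitstring) < length')
def pvPad (length : Int) (bitstring : List Char) : List Char :=
  if (bitstring.length : Int) < length then pvPad length ('0' :: bitstring) else bitstring
termination_by (length - bitstring.length).toNat
decreasing_by simp only [List.length_cons]; omega

-- invert_bitstring loop body: bitstring = bitstring[:ind] + ("1"|"0") + bitstring[ind+1:]
def pvInvertStep (s : List Char) (ind : Int) : List Char :=
  if PySem.List.pyGet? s ind = some '0' then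
    PySem.List.slice s none (some ind) ++ '1' :: PySem.List.slice s (some (ind + 1)) none
  else
    PySem.List.slice s none (some ind) ++ '0' :: PySem.List.slice s (some (ind + 1)) none

def pvInvert (s : List Char) : List Char :=
  (PySem.List.pyRange 0 (s.length : Int) 1).foldl pvInvertStep s

-- add_one loop body, state = (carry, bitstring)
def pvAddOneStep (st : Int × List Char) (ind : Int) : Int × List Char :=
  if st.1 = 1 ∧ PySem.List.pyGet? st.2 ind = some '1' then
    (1, PySem.List.slice st.2 none (some ind) ++ '0' :: PySem.List.slice st.2 (some (ind + 1)) none)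
  else if st.1 = 1 then
    (0, PySem.List.slice st.2 none (some ind) ++ '1' :: PySem.List.slice st.2 (some (ind + 1)) none)
  else st

def pvAddOne (s : List Char) : List Char :=
  ((PySem.List.pyRange ((s.length : Int) - 1) (-1) (-1)).foldl pvAddOneStep (1, s)).2

def neg_int_to_bitstring (value : Int) (length : Int) : String :=
  -- branch guard 'value == -(2**(length-1))': exact — for 1 ≤ length it is integer equality; for
  -- -1073 ≤ length ≤ 0 the float 2**(length-1) is fractional and equals no int; for length ≤ -1074
  -- CPython's 2.0**(length-1) underflows to 0.0 and '0 == -(0.0)' is True.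
  if (1 ≤ length ∧ value = -(2 ^ (length - 1).toNat : Int)) ∨ (value = 0 ∧ length ≤ -1074) then
    String.ofList ('1' :: (PySem.List.pyRange 0 (length - 1) 1).foldl (fun b _ => b ++ ['0']) [])
  else
    String.ofList (pvAddOne (pvInvert (pvPad length (pvPosLoop |value| []))))

-- ===== PORT B =====
def neg_int_to_bitstring_alt (value : Int) (length : Int) : String :=
  if value = 0 then String.ofList (List.replicate (max length 0).toNat '0')
  else
    let a : Int := |value|
    let w : Int := max length (PySem.Int.bitLength a : Int)
    let m : Int := 2 ^ w.toNat - a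
    -- format(m, "0{w}b") with m > 0: binary digits of m, left-padded with '0' to width w (exact here: m > 0)
    let ds := PySem.Int.toBinChars m
    String.ofList (List.replicate (w.toNat - ds.length) '0' ++ ds)

-- ===== PRECONDITION & SPEC =====
-- On value = 0 with length ≤ -1074, CPython's float 2**(length-1) underflows to 0.0, so A's guard
-- '0 == -(0.0)' fires and A returns "1"; B returns "" ("0" * max(length, 0)), the intended value of
-- '0 padded to a non-positive width', consistent with A's own result for every other negative length.
def D_neg_int_to_bitstring (value : Int) (length : Int) : Prop := value = 0 ∧ length < -1073
instance (value : Int) (length : Int) : Decidable (D_neg_int_to_bitstring value length) := by unfold D_neg_int_to_bitstring; infer_instance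

def Spec_neg_int_to_bitstring (value : Int) (length : Int) (out : String) : Prop := ¬ D_neg_int_to_bitstring value length → out = neg_int_to_bitstring_alt value length
instance (value : Int) (length : Int) (out : String) : Decidable (Spec_neg_int_to_bitstring value length out) := by unfold Spec_neg_int_to_bitstring; infer_instance

def pvDiffWitness_neg_int_to_bitstring : Int × Int := (0, -1074)
def pvDiffWitnessOut_neg_int_to_bitstring : String × String := ("1", "")

-- ===== CLAIM (what is proved, stated in full; the proofs are below) =====
def Claim_unchanged_neg_int_to_bitstring : Prop := ∀ (value : Int) (length : Int), Dom_neg_int_to_bitstring value length → Spec_neg_int_to_bitstring value length (neg_int_to_bitstring value length)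
def Claim_changed_neg_int_to_bitstring : Prop := Dom_neg_int_to_bitstring (pvDiffWitness_neg_int_to_bitstring.1) (pvDiffWitness_neg_int_to_bitstring.2) ∧ D_neg_int_to_bitstring (pvDiffWitness_neg_int_to_bitstring.1) (pvDiffWitness_neg_int_to_bitstring.2) ∧ neg_int_to_bitstring (pvDiffWitness_neg_int_to_bitstring.1) (pvDiffWitness_neg_int_to_bitstring.2) = pvDiffWitnessOut_neg_int_to_bitstring.1 ∧ neg_int_to_bitstring_alt (pvDiffWitness_neg_int_to_bitstring.1) (pvDiffWitness_neg_int_to_bitstring.2) = pvDiffWitnessOut_neg_int_to_bitstring.2 ∧ pvDiffWitnessOut_neg_int_to_bitstring.1 ≠ pvDiffWitnessOut_neg_int_to_bitstring.2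
def Claim_exact_neg_int_to_bitstring : Prop := ∀ (value : Int) (length : Int), Dom_neg_int_to_bitstring value length → D_neg_int_to_bitstring value length → neg_int_to_bitstring value length ≠ neg_int_to_bitstring_alt value length

-- ===== LEMMAS AND PROOFS =====

-- proof-side canonical objects
def pvBits (n : Nat) : List Char :=
  if _h : n = 0 then [] else pvBits (n / 2) ++ [Nat.digitChar (n % 2)]
decreasing_by exact Nat.div_lt_self (Nat.pos_of_ne_zero _h) one_lt_two

def pvBit (c : Char) : Nat := if c = '1' then 1 else 0
def pvVal (s : List Char) : Nat := s.foldl (fun n c => 2 * n + pvBit c) 0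
def pvFlip (c : Char) : Char := if c = '0' then '1' else '0'
def pvValR : List Char → Nat
  | [] => 0
  | c :: t => pvBit c + 2 * pvValR t
def pvIncR : List Char → List Char
  | [] => []
  | c :: t => if c = '1' then '0' :: pvIncR t else '1' :: t

def pvIsBin (s : List Char) : Prop := ∀ c ∈ s, c = '0' ∨ c = '1'


-- foldl with an arbitrary accumulator
theorem pvVal_foldl_init (s : List Char) : ∀ n : Nat, s.foldl (fun n c => 2 * n + pvBit c) n = n * 2 ^ s.length + pvVal s := by
  induction s with
  | nil => intro n; simp [pvVal]
  | cons c t ih =>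
    intro n
    show t.foldl _ (2 * n + pvBit c) = n * 2 ^ (c :: t).length + pvVal (c :: t)
    have h2 : pvVal (c :: t) = t.foldl (fun n c => 2 * n + pvBit c) (2 * 0 + pvBit c) := rfl
    rw [ih, h2, ih (2 * 0 + pvBit c)]
    simp [List.length_cons, pow_succ]
    ring

theorem pvVal_cons (c : Char) (t : List Char) : pvVal (c :: t) = pvBit c * 2 ^ t.length + pvVal t := by
  have h : pvVal (c :: t) = t.foldl (fun n c => 2 * n + pvBit c) (2 * 0 + pvBit c) := rfl
  rw [h, pvVal_foldl_init]
  ring_nf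

theorem pvBit_le_one (c : Char) : pvBit c ≤ 1 := by
  unfold pvBit; split <;> omega

theorem pvVal_lt (s : List Char) : pvVal s < 2 ^ s.length := by
  induction s with
  | nil => simp [pvVal]
  | cons c t ih =>
    rw [pvVal_cons]
    have hb := pvBit_le_one c
    have h2 : (2:Nat) ^ (c :: t).length = 2 * 2 ^ t.length := by
      simp [List.length_cons, pow_succ]; ring
    have he : pvBit c * 2 ^ t.length ≤ 1 * 2 ^ t.length := Nat.mul_le_mul_right _ hb
    rw [one_mul] at he
    omega

theorem pvVal_append_singleton (xs : List Char) (c : Char) :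
    pvVal (xs ++ [c]) = 2 * pvVal xs + pvBit c := by
  simp [pvVal, List.foldl_append]

theorem pvVal_replicate_zero (k : Nat) : pvVal (List.replicate k '0') = 0 := by
  induction k with
  | zero => simp [pvVal]
  | succ k ih =>
    rw [List.replicate_succ]
    have h : pvVal ('0' :: List.replicate k '0')
        = (List.replicate k '0').foldl (fun n c => 2 * n + pvBit c) (2 * 0 + pvBit '0') := rfl
    have hb : pvBit '0' = 0 := by decide
    rw [h, hb]
    simpa [pvVal] using ih

theorem pvVal_replicate_zero_append (k : Nat) (s : List Char) :
    pvVal (List.replicate k '0' ++ s) = pvVal s := by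
  have h : pvVal (List.replicate k '0' ++ s)
      = s.foldl (fun n c => 2 * n + pvBit c) (pvVal (List.replicate k '0')) := by
    simp [pvVal, List.foldl_append]
  rw [h, pvVal_replicate_zero]
  rfl

theorem pvVal_bits (n : Nat) : pvVal (pvBits n) = n := by
  induction n using Nat.strong_induction_on with
  | _ n ih =>
    rw [pvBits]
    by_cases h : n = 0
    · simp [h, pvVal]
    · simp only [h, dite_false]
      rw [pvVal_append_singleton, ih (n / 2) (by omega)]
      rcases Nat.mod_two_eq_zero_or_one n with h2 | h2 <;>
        rw [h2] <;> simp [pvBit, Nat.digitChar] <;> omega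

theorem pvBits_isBin (n : Nat) : pvIsBin (pvBits n) := by
  induction n using Nat.strong_induction_on with
  | _ n ih =>
    rw [pvBits]
    by_cases h : n = 0
    · simp [h, pvIsBin]
    · simp only [h, dite_false]
      intro c hc
      rcases List.mem_append.1 hc with hc | hc
      · exact ih (n / 2) (by omega) c hc
      · simp only [List.mem_singleton] at hc
        subst hc
        rcases Nat.mod_two_eq_zero_or_one n with h2 | h2 <;> rw [h2] <;> simp [Nat.digitChar]

theorem pvBits_length (n : Nat) : (pvBits n).length = PySem.Int.bitLength (n : Int) := by
  induction n using Nat.strong_induction_on with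
  | _ n ih =>
    rw [pvBits]
    by_cases h : n = 0
    · subst h; simp [PySem.Int.bitLength_zero]
    · simp only [h, dite_false, List.length_append, List.length_cons, List.length_nil]
      rw [ih (n / 2) (by omega)]
      exact (PySem.Int.bitLength_natCast (show 0 < n by omega)).symm

theorem pvBits_length_le (k n : Nat) (h : n < 2 ^ k) : (pvBits n).length ≤ k := by
  induction n using Nat.strong_induction_on generalizing k with
  | _ n ih =>
    rw [pvBits]
    by_cases h0 : n = 0
    · simp [h0]
    · simp only [h0, dite_false, List.length_append, List.length_cons, List.length_nil]
      cases k with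
      | zero => simp at h; omega
      | succ k' =>
        have hlt : n / 2 < 2 ^ k' := by
          have : (2:Nat) ^ (k' + 1) = 2 * 2 ^ k' := by rw [pow_succ]; ring
          omega
        have := ih (n / 2) (by omega) k' hlt
        omega

theorem pvFlip_isBin (s : List Char) : pvIsBin (s.map pvFlip) := by
  intro c hc
  rcases List.mem_map.1 hc with ⟨d, _, rfl⟩
  unfold pvFlip; split <;> simp

theorem pvVal_map_flip (s : List Char) (hs : pvIsBin s) :
    pvVal (s.map pvFlip) = 2 ^ s.length - 1 - pvVal s := by
  induction s with
  | nil => simp [pvVal]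
  | cons c t ih =>
    have hc := hs c (List.mem_cons_self ..)
    have ht : pvIsBin t := fun d hd => hs d (List.mem_cons_of_mem _ hd)
    rw [List.map_cons, pvVal_cons, pvVal_cons, ih ht, List.length_map, List.length_cons]
    have hvt := pvVal_lt t
    have h2 : (2:Nat) ^ (t.length + 1) = 2 * 2 ^ t.length := by rw [pow_succ]; ring
    have hb0 : pvBit '0' = 0 := by decide
    have hb1 : pvBit '1' = 1 := by decide
    have hf0 : pvFlip '0' = '1' := by decide
    have hf1 : pvFlip '1' = '0' := by decide
    rcases hc with rfl | rfl <;> rw [h2] <;>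
      simp only [hb0, hb1, hf0, hf1, one_mul, zero_mul, Nat.zero_add] <;> omega

theorem pvValR_incR (s : List Char) (h : ∃ c ∈ s, c ≠ '1') : pvValR (pvIncR s) = pvValR s + 1 := by
  induction s with
  | nil => simp at h
  | cons c t ih =>
    by_cases hc : c = '1'
    · subst hc
      have ht : ∃ c ∈ t, c ≠ '1' := by
        rcases h with ⟨d, hd, hne⟩
        rcases List.mem_cons.1 hd with rfl | hd
        · exact absurd rfl hne
        · exact ⟨d, hd, hne⟩
      show pvValR ('0' :: pvIncR t) = pvValR ('1' :: t) + 1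
      show pvBit '0' + 2 * pvValR (pvIncR t) = (pvBit '1' + 2 * pvValR t) + 1
      rw [ih ht]
      have h0 : pvBit '0' = 0 := by decide
      have h1 : pvBit '1' = 1 := by decide
      omega
    · show pvValR (pvIncR (c :: t)) = pvValR (c :: t) + 1
      have hstep : pvIncR (c :: t) = '1' :: t := by
        unfold pvIncR; simp [hc]
      rw [hstep]
      show pvBit '1' + 2 * pvValR t = (pvBit c + 2 * pvValR t) + 1
      have h1 : pvBit '1' = 1 := by decide
      have h0 : pvBit c = 0 := by unfold pvBit; simp [hc]
      omega

theorem pvIncR_length (s : List Char) : (pvIncR s).length = s.length := by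
  induction s with
  | nil => rfl
  | cons c t ih =>
    unfold pvIncR
    split <;> simp [ih]

theorem pvIncR_isBin (s : List Char) (hs : pvIsBin s) : pvIsBin (pvIncR s) := by
  induction s with
  | nil => exact hs
  | cons c t ih =>
    have ht : pvIsBin t := fun d hd => hs d (List.mem_cons_of_mem _ hd)
    unfold pvIncR
    split
    · intro d hd
      rcases List.mem_cons.1 hd with rfl | hd
      · left; rfl
      · exact ih ht d hd
    · intro d hd
      rcases List.mem_cons.1 hd with rfl | hd
      · right; rfl
      · exact ht d hd

theorem pvValR_append_singleton (xs : List Char) (c : Char) :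
    pvValR (xs ++ [c]) = pvValR xs + pvBit c * 2 ^ xs.length := by
  induction xs with
  | nil => show pvBit c + 2 * pvValR [] = _; simp [pvValR]
  | cons d t ih =>
    show pvBit d + 2 * pvValR (t ++ [c]) = (pvBit d + 2 * pvValR t) + pvBit c * 2 ^ (d :: t).length
    rw [ih]
    simp [List.length_cons, pow_succ]
    ring

theorem pvVal_eq_valR_reverse (s : List Char) : pvVal s = pvValR s.reverse := by
  induction s with
  | nil => rfl
  | cons c t ih =>
    rw [pvVal_cons, List.reverse_cons, pvValR_append_singleton, List.length_reverse, ih]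
    ring

theorem pvVal_inj (s : List Char) : ∀ (t : List Char), s.length = t.length → pvIsBin s → pvIsBin t →
    pvVal s = pvVal t → s = t := by
  induction s with
  | nil => intro t hlen _ _ _; cases t with
    | nil => rfl
    | cons b bs => simp at hlen
  | cons a as ih =>
    intro t hlen hs ht hv
    cases t with
    | nil => simp at hlen
    | cons b bs =>
      have hlen' : as.length = bs.length := by simpa using hlen
      rw [pvVal_cons, pvVal_cons, hlen'] at hv
      have h1 := pvVal_lt as
      have h2 := pvVal_lt bs
      rw [hlen'] at h1
      have ha := hs a (List.mem_cons_self ..)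
      have hb := ht b (List.mem_cons_self ..)
      have hb0 : pvBit '0' = 0 := by decide
      have hb1 : pvBit '1' = 1 := by decide
      have key : a = b ∧ pvVal as = pvVal bs := by
        rcases ha with rfl | rfl <;> rcases hb with rfl | rfl <;>
            simp only [hb0, hb1, one_mul, zero_mul, Nat.zero_add] at hv
        · exact ⟨rfl, hv⟩
        · exact absurd hv (by omega)
        · exact absurd hv (by omega)
        · exact ⟨rfl, by omega⟩
      obtain ⟨rfl, hveq⟩ := key
      rw [ih bs hlen' (fun d hd => hs d (List.mem_cons_of_mem _ hd))
        (fun d hd => ht d (List.mem_cons_of_mem _ hd)) hveq]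

-- (1) the divmod loop produces the binary digits
theorem pvPosLoop_eq (n : Nat) : ∀ acc, pvPosLoop (n : Int) acc = pvBits n ++ acc := by
  induction n using Nat.strong_induction_on with
  | _ n ih =>
    intro acc
    rw [pvPosLoop, pvBits]
    by_cases h : n = 0
    · simp [h]
    · have h1 : ¬ ((n : Int) = 0) := by exact_mod_cast h
      have h2 : ¬ ((n : Int) < 0) := by omega
      simp only [h1, if_false, h2, h, dite_false]
      have hf : PySem.Int.floordiv (n : Int) 2 = ((n / 2 : Nat) : Int) := by
        rw [PySem.Int.floordiv_eq_ediv_of_pos (by omega)]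
        omega
      have hm : PySem.Int.mod (n : Int) 2 = ((n % 2 : Nat) : Int) := by
        rw [PySem.Int.mod_eq_emod_of_pos (by omega)]
        omega
      rw [hf, hm, ih (n / 2) (by omega)]
      rcases Nat.mod_two_eq_zero_or_one n with h3 | h3 <;> rw [h3]
      · have : (PySem.Int.toStr ((0:Nat) : Int)).toList = ['0'] := by decide
        rw [this]
        simp [Nat.digitChar]
      · have : (PySem.Int.toStr ((1:Nat) : Int)).toList = ['1'] := by decide
        rw [this]
        simp [Nat.digitChar]

-- (2) the padding loop
theorem pvPad_eq (length : Int) (s : List Char) :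
    pvPad length s = List.replicate (length - s.length).toNat '0' ++ s := by
  fun_induction pvPad with
  | case1 s h ih =>
    rw [ih]
    have hd : (length - s.length).toNat = (length - (('0' :: s).length : Int)).toNat + 1 := by
      simp only [List.length_cons]
      push_cast
      omega
    rw [hd, show List.replicate ((length - (('0' :: s).length : Int)).toNat + 1) '0'
        = List.replicate ((length - (('0' :: s).length : Int)).toNat) '0' ++ ['0'] from List.replicate_succ' ..]
    simp
  | case2 s h =>
    have hd : (length - s.length).toNat = 0 := by omega
    rw [hd]
    simp

-- (3) invert_bitstring maps pvFlip over the string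
theorem pvInvertStep_at (pre suf : List Char) (c : Char) :
    pvInvertStep (pre ++ c :: suf) (pre.length : Int) = pre ++ pvFlip c :: suf := by
  unfold pvInvertStep
  rw [PySem.List.pyGet?_append_length]
  have h1 : PySem.List.slice (pre ++ c :: suf) none (some (pre.length : Int)) = pre := by
    rw [PySem.List.slice_to_natCast, List.take_left]
  have h2 : PySem.List.slice (pre ++ c :: suf) (some ((pre.length : Int) + 1)) none = suf := by
    rw [show ((pre.length : Int) + 1) = (((pre ++ [c]).length : Nat) : Int) by simp,
      PySem.List.slice_from_natCast, show pre ++ c :: suf = (pre ++ [c]) ++ suf by simp,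
      List.drop_left]
  by_cases hc : c = '0'
  · subst hc
    simp only [h1, h2]
    rfl
  · have hne : ¬ (some c = some '0') := by simp [hc]
    simp only [hne, if_false, h1, h2]
    have : pvFlip c = '0' := by unfold pvFlip; simp [hc]
    rw [this]

theorem pvInvert_aux (suf : List Char) : ∀ (pre : List Char),
    (PySem.List.pyRange (pre.length : Int) ((pre.length : Int) + (suf.length : Int)) 1).foldl
      pvInvertStep (pre ++ suf) = pre ++ suf.map pvFlip := by
  induction suf with
  | nil =>
    intro pre
    rw [PySem.List.pyRange_one_eq_nil (by simp)]
    simp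
  | cons c rest ih =>
    intro pre
    have hlt : (pre.length : Int) < (pre.length : Int) + ((c :: rest).length : Int) := by
      simp only [List.length_cons]
      push_cast
      omega
    rw [PySem.List.pyRange_one_cons hlt, List.foldl_cons, pvInvertStep_at]
    have hre : pre ++ pvFlip c :: rest = (pre ++ [pvFlip c]) ++ rest := by simp
    have hlen : ((pre ++ [pvFlip c]).length : Int) = (pre.length : Int) + 1 := by
      simp
    have hend : (pre.length : Int) + ((c :: rest).length : Int)
        = ((pre ++ [pvFlip c]).length : Int) + (rest.length : Int) := by
      simp only [List.length_append, List.length_cons, List.length_nil]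
      push_cast
      omega
    rw [hre, hend, ← hlen, ih (pre ++ [pvFlip c])]
    simp

theorem pvInvert_eq (s : List Char) : pvInvert s = s.map pvFlip := by
  have h := pvInvert_aux s []
  simpa [pvInvert] using h

-- (4) add_one is binary increment from the right with the final carry dropped
theorem pvAddOne_noop (l : List Int) (s : List Char) : l.foldl pvAddOneStep (0, s) = (0, s) := by
  induction l with
  | nil => rfl
  | cons i t ih =>
    rw [List.foldl_cons, show pvAddOneStep (0, s) i = (0, s) by unfold pvAddOneStep; simp]
    exact ih

theorem pvAddOneStep_at (pre suf : List Char) (c : Char) (carry : Int) :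
    pvAddOneStep (carry, pre ++ c :: suf) (pre.length : Int)
      = if carry = 1 ∧ c = '1' then (1, pre ++ '0' :: suf)
        else if carry = 1 then (0, pre ++ '1' :: suf) else (carry, pre ++ c :: suf) := by
  unfold pvAddOneStep
  simp only
  rw [PySem.List.pyGet?_append_length]
  have h1 : PySem.List.slice (pre ++ c :: suf) none (some (pre.length : Int)) = pre := by
    rw [PySem.List.slice_to_natCast, List.take_left]
  have h2 : PySem.List.slice (pre ++ c :: suf) (some ((pre.length : Int) + 1)) none = suf := by
    rw [show ((pre.length : Int) + 1) = (((pre ++ [c]).length : Nat) : Int) by simp,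
      PySem.List.slice_from_natCast, show pre ++ c :: suf = (pre ++ [c]) ++ suf by simp,
      List.drop_left]
  rw [h1, h2]
  by_cases hc : c = '1' <;> simp [hc]

theorem pvAddOne_aux (pre : List Char) : ∀ (suf : List Char),
    (PySem.List.pyRange ((pre.length : Int) - 1) (-1) (-1)).foldl pvAddOneStep (1, pre ++ suf)
      = ((if pre.all (· == '1') then 1 else 0 : Int), (pvIncR pre.reverse).reverse ++ suf) := by
  induction pre using List.reverseRecOn with
  | nil =>
    intro suf
    rw [PySem.List.pyRange_neg_one_eq_nil (by simp)]
    simp [pvIncR]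
  | append_singleton ys c ih =>
    intro suf
    have hstart : ((ys ++ [c]).length : Int) - 1 = (ys.length : Int) := by
      simp
    rw [hstart, PySem.List.pyRange_neg_one_cons (by omega), List.foldl_cons,
      show (ys ++ [c]) ++ suf = ys ++ c :: suf by simp, pvAddOneStep_at]
    by_cases hc : c = '1'
    · subst hc
      rw [if_pos (show (1:Int) = 1 ∧ ('1':Char) = '1' from ⟨rfl, rfl⟩), ih ('0' :: suf)]
      have e1 : (ys ++ ['1']).all (· == '1') = ys.all (· == '1') := by simp [List.all_append]
      have e2 : (pvIncR ((ys ++ ['1']).reverse)).reverse = (pvIncR ys.reverse).reverse ++ ['0'] := by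
        rw [List.reverse_append]
        show (pvIncR ('1' :: ys.reverse)).reverse = _
        rw [show pvIncR ('1' :: ys.reverse) = '0' :: pvIncR ys.reverse by rw [pvIncR]; simp,
          List.reverse_cons]
      rw [e1, e2]
      simp
    · have hcond : ¬ ((1:Int) = 1 ∧ c = '1') := by simp [hc]
      rw [if_neg hcond, if_pos rfl, pvAddOne_noop]
      have hall : (ys ++ [c]).all (· == '1') = false := by
        simp [List.all_append, hc]
      rw [hall]
      have hinc : pvIncR ((ys ++ [c]).reverse) = '1' :: ys.reverse := by
        rw [List.reverse_append]
        show pvIncR (c :: ys.reverse) = '1' :: ys.reverse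
        unfold pvIncR
        simp [hc]
      rw [hinc]
      simp

theorem pvAddOne_eq (s : List Char) : pvAddOne s = (pvIncR s.reverse).reverse := by
  unfold pvAddOne
  have h := pvAddOne_aux s []
  rw [List.append_nil, List.append_nil] at h
  rw [h]

-- numeric toolbox














theorem pvTDC (fuel : Nat) : ∀ n : Nat, n < fuel → ∀ acc,
    Nat.toDigitsCore 2 fuel n acc = (if n = 0 then ['0'] else pvBits n) ++ acc := by
  induction fuel with
  | zero => intro n h; omega
  | succ f ih =>
    intro n h acc
    show (if n / 2 = 0 then (n % 2).digitChar :: acc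
        else Nat.toDigitsCore 2 f (n / 2) ((n % 2).digitChar :: acc)) = _
    by_cases h2 : n / 2 = 0
    · rw [if_pos h2]
      have hub : n < 2 := by omega
      interval_cases n
      · simp [Nat.digitChar]
      · rw [pvBits]; simp [Nat.digitChar]; rw [pvBits]; simp
    · rw [if_neg h2, ih (n / 2) (by omega) ((n % 2).digitChar :: acc), if_neg h2]
      conv_rhs => rw [pvBits]
      have hn : ¬ n = 0 := by omega
      simp [hn]

theorem pvToDigits_two (n : Nat) (hn : 0 < n) : Nat.toDigits 2 n = pvBits n := by
  show Nat.toDigitsCore 2 (n + 1) n [] = pvBits n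
  rw [pvTDC (n + 1) n (by omega) []]
  simp [show ¬ n = 0 by omega]

theorem pvBits_two_pow (k : Nat) : pvBits (2 ^ k) = '1' :: List.replicate k '0' := by
  induction k with
  | zero =>
    rw [pvBits]
    norm_num
    rw [pvBits]
    simp [Nat.digitChar]
  | succ k ih =>
    rw [pvBits]
    have h0 : ¬ (2:Nat) ^ (k + 1) = 0 := by positivity
    have hd : (2:Nat) ^ (k + 1) / 2 = 2 ^ k := by rw [pow_succ]; omega
    have hm : (2:Nat) ^ (k + 1) % 2 = 0 := by rw [pow_succ]; omega
    simp only [h0, dite_false, hd, hm, ih]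
    rw [show (List.replicate (k + 1) '0') = List.replicate k '0' ++ ['0'] from List.replicate_succ' ..]
    simp [Nat.digitChar]

theorem pvIncR_replicate_one (k : Nat) :
    pvIncR (List.replicate k '1') = List.replicate k '0' := by
  induction k with
  | zero => rfl
  | succ k ih => simp [List.replicate_succ, pvIncR, ih]


theorem pvFoldlZeros (l : List Int) : ∀ init : List Char,
    l.foldl (fun b _ => b ++ ['0']) init = init ++ List.replicate l.length '0' := by
  induction l with
  | nil => intro init; simp
  | cons i t ih =>
    intro init
    rw [List.foldl_cons, ih, List.length_cons, List.replicate_succ]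
    simp

theorem pvMem_one_of_val_pos (s : List Char) (h : 0 < pvVal s) : '1' ∈ s := by
  induction s with
  | nil => simp [pvVal] at h
  | cons c t ih =>
    by_cases hc : c = '1'
    · subst hc; exact List.mem_cons_self ..
    · rw [pvVal_cons] at h
      have hb : pvBit c = 0 := by unfold pvBit; simp [hc]
      rw [hb, zero_mul, Nat.zero_add] at h
      exact List.mem_cons_of_mem _ (ih h)

theorem pvBits_length_pos (n : Nat) (h : n ≠ 0) : 1 ≤ (pvBits n).length := by
  rw [pvBits]
  simp [h]

theorem pvMainEq (value length : Int) (hv : value ≠ 0) :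
    String.ofList (pvAddOne (pvInvert (pvPad length (pvPosLoop |value| []))))
      = neg_int_to_bitstring_alt value length := by
  have ha0 : 0 < value.natAbs := Int.natAbs_pos.mpr hv
  set aN := value.natAbs with haN
  have habs : |value| = (aN : Int) := Int.abs_eq_natAbs value
  rw [habs, pvPosLoop_eq aN [], List.append_nil, pvPad_eq, pvInvert_eq, pvAddOne_eq]
  set bl := (pvBits aN).length with hbl
  have hbl1 : 1 ≤ bl := pvBits_length_pos aN (by omega)
  set p := (length - ((pvBits aN).length : Int)).toNat with hp
  set s1 := List.replicate p '0' ++ pvBits aN with hs1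
  have hw : s1.length = p + bl := by
    rw [hs1, List.length_append, List.length_replicate, ← hbl]
  set w := p + bl with hwdef
  have hbin1 : pvIsBin s1 := by
    intro c hc
    rcases List.mem_append.1 hc with hc | hc
    · left; exact List.eq_of_mem_replicate hc
    · exact pvBits_isBin aN c hc
  have hval1 : pvVal s1 = aN := by rw [hs1, pvVal_replicate_zero_append, pvVal_bits]
  have haNlt : aN < 2 ^ w := by
    have := pvVal_lt s1
    rw [hval1, hw] at this
    exact this
  have hlen2 : (s1.map pvFlip).length = w := by rw [List.length_map, hw]
  have hbin2 := pvFlip_isBin s1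
  have hval2 : pvVal (s1.map pvFlip) = 2 ^ w - 1 - aN := by
    rw [pvVal_map_flip s1 hbin1, hval1, hw]
  have hmem1 : '1' ∈ s1 := pvMem_one_of_val_pos s1 (by omega)
  have hmem0 : ∃ c ∈ (s1.map pvFlip).reverse, c ≠ '1' := by
    refine ⟨'0', ?_, by decide⟩
    rw [List.mem_reverse]
    exact List.mem_map.2 ⟨'1', hmem1, by decide⟩
  set A3 := (pvIncR (s1.map pvFlip).reverse).reverse with hA3
  have hlen3 : A3.length = w := by
    rw [hA3, List.length_reverse, pvIncR_length, List.length_reverse, hlen2]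
  have hbin3 : pvIsBin A3 := by
    intro c hc
    rw [hA3, List.mem_reverse] at hc
    exact pvIncR_isBin _ (fun d hd => hbin2 d (List.mem_reverse.1 hd)) c hc
  have hpow : 0 < 2 ^ w := Nat.pow_pos (by omega)
  have hval3 : pvVal A3 = 2 ^ w - aN := by
    rw [hA3, pvVal_eq_valR_reverse, List.reverse_reverse, pvValR_incR _ hmem0,
      ← pvVal_eq_valR_reverse, hval2]
    omega
  -- the B side
  unfold neg_int_to_bitstring_alt
  rw [if_neg hv, habs]
  have hblc : PySem.Int.bitLength ((aN : Nat) : Int) = bl := (pvBits_length aN).symm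
  show String.ofList A3 = String.ofList (List.replicate ((max length (PySem.Int.bitLength (aN:Int) : Int)).toNat
      - (PySem.Int.toBinChars (2 ^ (max length (PySem.Int.bitLength (aN:Int) : Int)).toNat - (aN:Int))).length) '0'
      ++ PySem.Int.toBinChars (2 ^ (max length (PySem.Int.bitLength (aN:Int) : Int)).toNat - (aN:Int)))
  rw [hblc]
  have hwB : (max length ((bl : Nat) : Int)).toNat = w := by
    rw [hwdef, hp, ← hbl]
    omega
  rw [hwB]
  have hm : (2 : Int) ^ w - (aN : Int) = ((2 ^ w - aN : Nat) : Int) := by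
    rw [Nat.cast_sub (le_of_lt haNlt)]
    push_cast
    ring
  have hds : PySem.Int.toBinChars ((2:Int) ^ w - (aN : Int)) = pvBits (2 ^ w - aN) := by
    rw [hm]
    unfold PySem.Int.toBinChars
    rw [if_neg (by omega), Int.toNat_natCast]
    exact pvToDigits_two _ (by omega)
  rw [hds]
  have hdl : (pvBits (2 ^ w - aN)).length ≤ w := pvBits_length_le w _ (by omega)
  apply congrArg String.ofList
  refine pvVal_inj A3 _ ?_ hbin3 ?_ ?_
  · rw [hlen3]
    simp only [List.length_append, List.length_replicate]
    omega
  · intro c hc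
    rcases List.mem_append.1 hc with hc | hc
    · left; exact List.eq_of_mem_replicate hc
    · exact pvBits_isBin _ c hc
  · rw [hval3, pvVal_replicate_zero_append, pvVal_bits]

theorem pvZeroEq (length : Int) :
    String.ofList (pvAddOne (pvInvert (pvPad length (pvPosLoop |(0:Int)| []))))
      = neg_int_to_bitstring_alt 0 length := by
  have h0 : |(0:Int)| = ((0 : Nat) : Int) := by simp
  rw [h0, pvPosLoop_eq 0 [], List.append_nil, show pvBits 0 = [] by rw [pvBits]; simp,
    pvPad_eq, List.append_nil, pvInvert_eq, pvAddOne_eq, List.map_replicate,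
    show pvFlip '0' = '1' by decide, List.reverse_replicate, pvIncR_replicate_one,
    List.reverse_replicate]
  unfold neg_int_to_bitstring_alt
  rw [if_pos rfl]
  have : (length - (([] : List Char).length : Int)).toNat = (max length 0).toNat := by
    simp
    omega
  rw [this]

theorem pvBranchEq (length : Int) (hl : 1 ≤ length) :
    String.ofList ('1' :: (PySem.List.pyRange 0 (length - 1) 1).foldl (fun b _ => b ++ ['0']) [])
      = neg_int_to_bitstring_alt (-(2 ^ (length - 1).toNat : Int)) length := by
  set k := (length - 1).toNat with hk
  have hlen : length = (k : Int) + 1 := by omega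
  have hvne : (-(2 ^ k : Int)) ≠ 0 := by
    have : (0:Int) < 2 ^ k := by positivity
    omega
  have hA : (PySem.List.pyRange 0 (length - 1) 1).foldl (fun b _ => b ++ ['0']) []
      = List.replicate k '0' := by
    rw [pvFoldlZeros, List.nil_append, PySem.List.length_pyRange_one]
    congr 1
    omega
  rw [hA]
  have habs : |(-(2 ^ k : Int))| = (((2 ^ k : Nat) : Nat) : Int) := by
    rw [abs_neg, abs_of_nonneg (by positivity)]
    push_cast
    ring
  have hblc : PySem.Int.bitLength (((2 ^ k : Nat) : Nat) : Int) = k + 1 := by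
    rw [← pvBits_length, pvBits_two_pow]
    simp
  unfold neg_int_to_bitstring_alt
  rw [if_neg hvne, habs]
  show _ = String.ofList (List.replicate ((max length ((PySem.Int.bitLength (((2 ^ k : Nat)) : Int) : Nat) : Int)).toNat
      - (PySem.Int.toBinChars (2 ^ (max length ((PySem.Int.bitLength (((2 ^ k : Nat)) : Int) : Nat) : Int)).toNat - ((2 ^ k : Nat) : Int))).length) '0'
      ++ PySem.Int.toBinChars (2 ^ (max length ((PySem.Int.bitLength (((2 ^ k : Nat)) : Int) : Nat) : Int)).toNat - ((2 ^ k : Nat) : Int)))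
  rw [hblc]
  have hwB : (max length ((k + 1 : Nat) : Int)).toNat = k + 1 := by omega
  rw [hwB]
  have hm : (2 : Int) ^ (k + 1) - ((2 ^ k : Nat) : Int) = ((2 ^ k : Nat) : Int) := by
    push_cast
    rw [pow_succ]
    ring
  rw [hm]
  have hds : PySem.Int.toBinChars (((2 ^ k : Nat) : Nat) : Int) = '1' :: List.replicate k '0' := by
    unfold PySem.Int.toBinChars
    have h1 : (0 : Int) ≤ (((2 ^ k : Nat) : Nat) : Int) := Int.natCast_nonneg _
    rw [if_neg (by omega), Int.toNat_natCast]
    rw [pvToDigits_two _ (by positivity), pvBits_two_pow]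
  rw [hds]
  simp

-- ===== VERDICT (by name: the statement is the Claim_ definition above) =====
theorem neg_int_to_bitstring_spec : Claim_unchanged_neg_int_to_bitstring := by
  intro value length _
  unfold Spec_neg_int_to_bitstring
  intro hnd
  unfold D_neg_int_to_bitstring at hnd
  unfold neg_int_to_bitstring
  by_cases hb : (1 ≤ length ∧ value = -(2 ^ (length - 1).toNat : Int)) ∨ (value = 0 ∧ length ≤ -1074)
  · rcases hb with hb | hb
    · rw [if_pos (Or.inl hb), hb.2]
      exact pvBranchEq length hb.1
    · exact absurd ⟨hb.1, by omega⟩ hnd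
  · rw [if_neg hb]
    by_cases hv : value = 0
    · subst hv
      exact pvZeroEq length
    · exact pvMainEq value length hv

theorem neg_int_to_bitstring_changed : Claim_changed_neg_int_to_bitstring := by
  unfold Claim_changed_neg_int_to_bitstring
  decide

theorem neg_int_to_bitstring_tight : Claim_exact_neg_int_to_bitstring := by
  intro value length _ hd
  unfold D_neg_int_to_bitstring at hd
  obtain ⟨hv, hl⟩ := hd
  subst hv
  unfold neg_int_to_bitstring neg_int_to_bitstring_alt
  rw [if_pos (Or.inr ⟨rfl, by omega⟩), if_pos rfl,
    PySem.List.pyRange_one_eq_nil (by omega : length - 1 ≤ 0),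
    show (max length 0).toNat = 0 by omega]
  decide
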